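-- pv_equiv track=rewrite | github.com/ari10000krat/checkio | Home/Backward Each Word.py | parse_separators
-- ===== SOURCE A (Python) =====
-- def parse_separators(text: str) -> list:
--     """
--     Parse text
--     :return: arr with separators between words
--     """
--     separators_arr = []
--     separator_str = ''
--     for char in text:
--         if char.isspace():
--             separator_str += char
--         elif len(separator_str) > 0:
--             separators_arr.append(separator_str)
--             separator_str = ''
--     return separators_arr
-- ===== SOURCE B (Python) =====
-- def parse_separators(text: str) -> list:
--     """
--     Parse text
--     :return: arr with separators between words
--     """
--     # Split text into maximal runs of same isspace-kind by index scanning,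
--     # then drop a trailing whitespace run and keep the whitespace runs.
--     groups = []
--     i, n = 0, len(text)
--     while i < n:
--         k = text[i].isspace()
--         j = i + 1
--         while j < n and text[j].isspace() == k:
--             j += 1
--         groups.append((k, text[i:j]))
--         i = j
--     if groups and groups[-1][0]:
--         groups.pop()
--     return [s for k, s in groups if k]
-- ===== Notes on version B (the rewrite author's own statement) =====
-- stated objective: alternative
-- what changed: B splits the text into maximal same-kind runs by index scanning (a hand-rolled groupby), drops a trailing whitespace run and keeps the whitespace runs, instead of A's character-by-character accumulator with emit-on-word-start.
import Mathlib
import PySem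

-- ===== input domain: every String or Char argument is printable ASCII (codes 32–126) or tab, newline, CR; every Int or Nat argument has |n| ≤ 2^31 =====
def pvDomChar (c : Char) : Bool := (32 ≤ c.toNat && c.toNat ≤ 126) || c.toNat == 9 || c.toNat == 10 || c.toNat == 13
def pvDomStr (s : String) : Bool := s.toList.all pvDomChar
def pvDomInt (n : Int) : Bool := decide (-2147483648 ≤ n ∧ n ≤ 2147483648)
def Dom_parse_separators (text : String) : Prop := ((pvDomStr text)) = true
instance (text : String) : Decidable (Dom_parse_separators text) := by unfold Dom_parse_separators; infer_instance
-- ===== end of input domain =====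

-- B replaces A's character accumulator by a maximal-run (groupby-style) split; alternative, same cost.

-- ===== PORT A =====
-- strings are handled as their List Char contents; String.mk rebuilds the Python str values at return
def pvALoop : List Char → List (List Char) → List Char → List (List Char)
  | [], arr, _ => arr
  | c :: cs, arr, sep =>
    if PySem.Chars.isspace c then pvALoop cs arr (sep ++ [c])
    else if sep.length > 0 then pvALoop cs (arr ++ [sep]) []
    else pvALoop cs arr sep

def parse_separators (text : String) : List String :=
  (pvALoop text.toList [] []).map String.mk

-- ===== PORT B =====
-- the outer while loop of Source B: cut off the maximal run of the head's isspace-kind, recurse on the rest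
def pvRuns : List Char → List (Bool × List Char)
  | [] => []
  | c :: rest =>
    let k := PySem.Chars.isspace c
    (k, c :: rest.takeWhile (fun x => PySem.Chars.isspace x == k)) ::
      pvRuns (rest.dropWhile (fun x => PySem.Chars.isspace x == k))
termination_by cs => cs.length
decreasing_by
  exact Nat.lt_succ_of_le (List.length_dropWhile_le _ _)

def parse_separators_alt (text : String) : List String :=
  let gs := pvRuns text.toList
  let gs' : List (Bool × List Char) := match gs.getLast? with
    | some (true, _) => gs.dropLast
    | _ => gs
  (gs'.filter (fun p => p.1)).map (fun p => String.mk p.2)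

-- ===== PRECONDITION & SPEC =====
def Spec_parse_separators (text : String) (out : List String) : Prop := out = parse_separators_alt text
instance (text : String) (out : List String) : Decidable (Spec_parse_separators text out) := by unfold Spec_parse_separators; infer_instance

-- ===== CLAIM (what is proved, stated in full; the proofs are below) =====
def Claim_equal_parse_separators : Prop := ∀ (text : String), Dom_parse_separators text → Spec_parse_separators text (parse_separators text)

-- ===== LEMMAS AND PROOFS =====

-- the List-Char-level result of B, as a function of the run list (proof helper only)
def pvF (gs : List (Bool × List Char)) : List (List Char) :=
  (((match gs.getLast? with
    | some (true, _) => gs.dropLast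
    | _ => gs : List (Bool × List Char))).filter (fun p => p.1)).map (fun p => p.2)

lemma pvALoop_append (cs : List Char) (arr : List (List Char)) (sep : List Char) :
    pvALoop cs arr sep = arr ++ pvALoop cs [] sep := by
  induction cs generalizing arr sep with
  | nil => simp [pvALoop]
  | cons c cs ih =>
    simp only [pvALoop]
    split_ifs with h1 h2
    · exact ih arr (sep ++ [c])
    · rw [ih (arr ++ [sep]) [], ih ([] ++ [sep]) []]; simp
    · exact ih arr sep

lemma pvALoop_spaces (r : List Char) (h : ∀ c ∈ r, PySem.Chars.isspace c = true)
    (cs : List Char) (arr : List (List Char)) (sep : List Char) :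
    pvALoop (r ++ cs) arr sep = pvALoop cs arr (sep ++ r) := by
  induction r generalizing sep with
  | nil => simp
  | cons c r ih =>
    have hc : PySem.Chars.isspace c = true := h c (by simp)
    simp only [List.cons_append, pvALoop, hc, if_true]
    rw [ih (fun x hx => h x (by simp [hx])) (sep ++ [c])]
    simp

lemma pvALoop_nonspaces (r : List Char) (h : ∀ c ∈ r, PySem.Chars.isspace c = false)
    (cs : List Char) (arr : List (List Char)) :
    pvALoop (r ++ cs) arr [] = pvALoop cs arr [] := by
  induction r with
  | nil => simp
  | cons c r ih =>
    have hc : PySem.Chars.isspace c = false := h c (by simp)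
    simp only [List.cons_append, pvALoop, hc]
    exact ih (fun x hx => h x (by simp [hx]))

lemma pvF_nil : pvF [] = [] := by simp [pvF]

lemma pvF_false (r : List Char) (gs : List (Bool × List Char)) :
    pvF ((false, r) :: gs) = pvF gs := by
  cases gs with
  | nil => simp [pvF]
  | cons g gs' =>
    simp only [pvF, List.getLast?_cons_cons]
    cases hlast : (g :: gs').getLast? with
    | none => simp at hlast
    | some p =>
      cases p with
      | mk b rr =>
        cases b <;> simp [List.dropLast_cons_of_ne_nil]

lemma pvF_true_nil (r : List Char) : pvF [(true, r)] = [] := by simp [pvF]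

lemma pvF_true_cons (r : List Char) (gs : List (Bool × List Char)) (h : gs ≠ []) :
    pvF ((true, r) :: gs) = r :: pvF gs := by
  cases gs with
  | nil => exact absurd rfl h
  | cons g gs' =>
    simp only [pvF, List.getLast?_cons_cons]
    cases hlast : (g :: gs').getLast? with
    | none => simp at hlast
    | some p =>
      cases p with
      | mk b rr =>
        cases b <;> simp [List.dropLast_cons_of_ne_nil]

lemma pvDropWhileHead {α : Type} (p : α → Bool) (l : List α) (d : α) (t : List α)
    (h : l.dropWhile p = d :: t) : p d = false := by
  induction l with
  | nil => simp [List.dropWhile] at h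
  | cons a l ih =>
    rw [List.dropWhile_cons] at h
    by_cases pa : p a = true
    · simp [pa] at h; exact ih h
    · simp [pa] at h; rw [← h.1]; simpa using pa

lemma pvRuns_ne_nil (cs : List Char) (h : cs ≠ []) : pvRuns cs ≠ [] := by
  cases cs with
  | nil => exact absurd rfl h
  | cons c rest => simp [pvRuns]

lemma pvMain (n : Nat) : ∀ cs : List Char, cs.length ≤ n → pvALoop cs [] [] = pvF (pvRuns cs) := by
  induction n with
  | zero =>
    intro cs h
    have : cs = [] := List.eq_nil_of_length_eq_zero (Nat.le_zero.mp h)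
    subst this; simp [pvALoop, pvRuns, pvF_nil]
  | succ n ih =>
    intro cs hlen
    cases cs with
    | nil => simp [pvALoop, pvRuns, pvF_nil]
    | cons c rest =>
      set k := PySem.Chars.isspace c with hk
      set r := rest.takeWhile (fun x => PySem.Chars.isspace x == k) with hr
      set rest' := rest.dropWhile (fun x => PySem.Chars.isspace x == k) with hrest'
      have hsplit : r ++ rest' = rest := List.takeWhile_append_dropWhile
      have hrmem : ∀ x ∈ r, PySem.Chars.isspace x = k := by
        intro x hx
        have := List.mem_takeWhile_imp (hr ▸ hx)
        simpa using this
      have hruns : pvRuns (c :: rest) = (k, c :: r) :: pvRuns rest' := by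
        rw [pvRuns]
      have hlen' : rest'.length ≤ n := by
        have h1 : rest'.length ≤ rest.length := List.length_dropWhile_le _ _
        have h2 : rest.length ≤ n := by simpa using Nat.lt_succ_iff.mp (Nat.lt_of_lt_of_le (by simp) hlen)
        omega
      have hheadfail : ∀ d rest'', rest' = d :: rest'' → PySem.Chars.isspace d ≠ k := by
        intro d rest'' hd hdk
        have : (fun x => PySem.Chars.isspace x == k) d = false :=
          pvDropWhileHead _ rest d rest'' (hrest' ▸ hd)
        simp [hdk] at this
      cases hkc : k with
      | true =>
        rw [hkc] at hruns
        have hall : ∀ x ∈ c :: r, PySem.Chars.isspace x = true := by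
          intro x hx
          rcases List.mem_cons.mp hx with h | h
          · rw [h, ← hk, hkc]
          · rw [hrmem x h, hkc]
        have hstep : pvALoop (c :: rest) [] [] = pvALoop rest' [] (c :: r) := by
          conv_lhs => rw [← hsplit, ← List.cons_append]
          rw [pvALoop_spaces (c :: r) hall rest' [] []]
          simp
        cases hre : rest' with
        | nil =>
          rw [hstep, hre, hruns, hre]
          simp [pvALoop, pvRuns, pvF_true_nil]
        | cons d rest'' =>
          have hd : PySem.Chars.isspace d = false := by
            have := hheadfail d rest'' hre
            cases hdd : PySem.Chars.isspace d
            · rfl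
            · rw [hkc] at this; exact absurd hdd this
          rw [hstep, hre]
          have e1 : pvALoop (d :: rest'') [] (c :: r) = pvALoop rest'' [c :: r] [] := by
            simp [pvALoop, hd]
          have e2 : pvALoop (d :: rest'') [] [] = pvALoop rest'' [] [] := by
            simp [pvALoop, hd]
          rw [e1, pvALoop_append]
          have := ih rest' hlen'
          rw [hre] at this
          rw [hruns, hre, pvF_true_cons _ _ (pvRuns_ne_nil _ (by simp))]
          rw [← this, e2]
          simp
      | false =>
        rw [hkc] at hruns
        have hall : ∀ x ∈ c :: r, PySem.Chars.isspace x = false := by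
          intro x hx
          rcases List.mem_cons.mp hx with h | h
          · rw [h, ← hk, hkc]
          · rw [hrmem x h, hkc]
        have hstep : pvALoop (c :: rest) [] [] = pvALoop rest' [] [] := by
          conv_lhs => rw [← hsplit, ← List.cons_append]
          exact pvALoop_nonspaces (c :: r) hall rest' []
        rw [hstep, hruns, pvF_false, ih rest' hlen']

-- ===== VERDICT (by name: the statement is the Claim_ definition above) =====
theorem parse_separators_spec : Claim_equal_parse_separators := by
  intro text _
  unfold Spec_parse_separators parse_separators parse_separators_alt
  rw [pvMain text.toList.length text.toList le_rfl]
  simp [pvF]
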